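-- pv_equiv track=rewrite | github.com/huntvee/piton | 24_4_22/input1.py | maxkedd
-- ===== SOURCE A (Python) =====
-- def maxkedd(szamok, nevek):
--     maxert = 0
--     maxnev = None
--     for i in range(len(szamok)):
--         if szamok[i][1] > maxert:
--             maxert = szamok[i][1]
--             maxnev = nevek[i]
--     return maxert, maxnev
-- ===== SOURCE B (Python) =====
-- def maxkedd(szamok, nevek):
--     maxert = max((s[1] for s in szamok if s[1] > 0), default=0)
--     if maxert == 0:
--         return 0, None
--     for i in range(len(szamok)):
--         if szamok[i][1] == maxert:
--             return maxert, nevek[i]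
-- ===== Notes on version B (the rewrite author's own statement) =====
-- stated objective: alternative
-- what changed: Replaces the single combined running-max scan (which tracks value and name together) by two differently-shaped passes: first compute the winning positive value with max(..., default=0), then locate its first owner index in a second scan.
import Mathlib
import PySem

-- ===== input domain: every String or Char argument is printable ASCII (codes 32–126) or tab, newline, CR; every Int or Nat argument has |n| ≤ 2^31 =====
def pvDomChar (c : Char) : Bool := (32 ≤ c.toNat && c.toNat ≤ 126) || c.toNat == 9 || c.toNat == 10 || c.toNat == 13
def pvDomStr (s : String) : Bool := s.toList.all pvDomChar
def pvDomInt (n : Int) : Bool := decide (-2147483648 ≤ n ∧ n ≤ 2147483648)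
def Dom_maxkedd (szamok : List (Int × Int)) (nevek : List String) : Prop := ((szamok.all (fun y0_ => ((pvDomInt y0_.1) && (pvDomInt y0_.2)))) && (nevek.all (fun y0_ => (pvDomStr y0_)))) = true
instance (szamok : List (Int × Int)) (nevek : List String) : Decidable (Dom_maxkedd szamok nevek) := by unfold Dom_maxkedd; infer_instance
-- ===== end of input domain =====

-- B replaces A's single combined running-max scan by two passes (find the winning
-- positive value, then its first owner); alternative decomposition, same cost.


-- ===== PORT A =====
def maxkedd (szamok : List (Int × Int)) (nevek : List String) : Int × Option String :=
  (PySem.List.pyRange 0 (szamok.length : Int) 1).foldl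
    (fun st i =>
      if (PySem.List.pyGetD szamok i (0, 0)).2 > st.1 then
        ((PySem.List.pyGetD szamok i (0, 0)).2, PySem.List.pyGet? nevek i)
      else st)
    (0, none)

-- ===== PORT B =====
def maxkedd_alt (szamok : List (Int × Int)) (nevek : List String) : Int × Option String :=
  let maxert : Int :=
    PySem.List.maxD ((szamok.filter (fun s => decide (s.2 > 0))).map (fun s => s.2)) (fun v => v) 0
  if maxert = 0 then (0, none)
  else
    match (PySem.List.pyRange 0 (szamok.length : Int) 1).find?
        (fun i => (PySem.List.pyGetD szamok i (0, 0)).2 == maxert) with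
    | some i => (maxert, PySem.List.pyGet? nevek i)
    | none => (maxert, none)

-- ===== PRECONDITION & SPEC =====
-- Pre_ excludes exactly the inputs on which the Python A raises IndexError: those where
-- some running-max update index (a position with a positive value strictly above all
-- earlier values) falls outside nevek; Python B raises IndexError on the same inputs.
def Pre_maxkedd (szamok : List (Int × Int)) (nevek : List String) : Prop :=
  ∀ i : Nat, i < szamok.length →
    (0 < (szamok.getD i (0, 0)).2 ∧
      ∀ j : Nat, j < i → (szamok.getD j (0, 0)).2 < (szamok.getD i (0, 0)).2) →
    i < nevek.length
instance (szamok : List (Int × Int)) (nevek : List String) : Decidable (Pre_maxkedd szamok nevek) := by unfold Pre_maxkedd; infer_instance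

def pvWitness_maxkedd : (List (Int × Int)) × List String := ([(1, 2), (3, 1), (0, 2)], ["a", "b", "c"])

def Spec_maxkedd (szamok : List (Int × Int)) (nevek : List String) (out : Int × Option String) : Prop := out = maxkedd_alt szamok nevek
instance (szamok : List (Int × Int)) (nevek : List String) (out : Int × Option String) : Decidable (Spec_maxkedd szamok nevek out) := by unfold Spec_maxkedd; infer_instance

-- ===== CLAIM (what is proved, stated in full; the proofs are below) =====
def Claim_equal_maxkedd : Prop := ∀ (szamok : List (Int × Int)) (nevek : List String), Dom_maxkedd szamok nevek → Pre_maxkedd szamok nevek → Spec_maxkedd szamok nevek (maxkedd szamok nevek)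

-- ===== LEMMAS AND PROOFS =====

-- A's loop, re-expressed as structural recursion on the (suffix of the) list with an index counter.
def aRun (nevek : List String) : List (Int × Int) → Nat → Int × Option String → Int × Option String
  | [], _, st => st
  | s :: rest, k, st =>
      aRun nevek rest (k + 1) (if s.2 > st.1 then (s.2, PySem.List.pyGet? nevek (k : Int)) else st)

-- First index (from offset k) whose second component equals v.
def bIdx (v : Int) : List (Int × Int) → Nat → Option Nat
  | [], _ => none
  | s :: rest, k => if s.2 = v then some k else bIdx v rest (k + 1)

lemma drop_cons_lt {α : Type} {l : List α} {a : Nat} {x : α} {t : List α}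
    (h : l.drop a = x :: t) : a < l.length := by
  have hlen := congrArg List.length h
  rw [List.length_drop] at hlen
  simp at hlen
  omega

lemma drop_cons_getElem? {α : Type} {l : List α} {a : Nat} {x : α} {t : List α}
    (h : l.drop a = x :: t) : l[a]? = some x := by
  have h0 : (l.drop a)[0]? = some x := by rw [h]; rfl
  simpa [List.getElem?_drop] using h0

lemma drop_cons_tail {α : Type} {l : List α} {a : Nat} {x : α} {t : List α}
    (h : l.drop a = x :: t) : l.drop (a + 1) = t := by
  have : (l.drop a).drop 1 = t := by rw [h]; rfl
  rwa [List.drop_drop] at this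

lemma A_seg (szamok : List (Int × Int)) (nevek : List String) :
    ∀ (ys : List (Int × Int)) (a : Nat) (st : Int × Option String), szamok.drop a = ys →
    (PySem.List.pyRange (a : Int) (szamok.length : Int) 1).foldl
      (fun st i =>
        if (PySem.List.pyGetD szamok i (0, 0)).2 > st.1 then
          ((PySem.List.pyGetD szamok i (0, 0)).2, PySem.List.pyGet? nevek i)
        else st) st
    = aRun nevek ys a st := by
  intro ys
  induction ys with
  | nil =>
      intro a st h
      have hle : szamok.length ≤ a := List.drop_eq_nil_iff.mp h
      rw [PySem.List.pyRange_one_eq_nil (by exact_mod_cast hle)]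
      simp [aRun]
  | cons s rest ih =>
      intro a st h
      have hlt : a < szamok.length := drop_cons_lt h
      have hget : szamok[a]? = some s := drop_cons_getElem? h
      rw [PySem.List.pyRange_one_cons (by exact_mod_cast hlt)]
      have hgetD : PySem.List.pyGetD szamok (a : Int) (0, 0) = s := by
        rw [PySem.List.pyGetD_natCast, List.getD_eq_getElem?_getD, hget]
        rfl
      simp only [List.foldl_cons, hgetD, aRun]
      have hcast : (a : Int) + 1 = ((a + 1 : Nat) : Int) := by push_cast; ring
      rw [hcast]
      exact ih (a + 1) _ (drop_cons_tail h)

lemma B_seg (szamok : List (Int × Int)) (v : Int) :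
    ∀ (ys : List (Int × Int)) (a : Nat), szamok.drop a = ys →
    (PySem.List.pyRange (a : Int) (szamok.length : Int) 1).find?
      (fun i => (PySem.List.pyGetD szamok i (0, 0)).2 == v)
    = (bIdx v ys a).map (fun k => (k : Int)) := by
  intro ys
  induction ys with
  | nil =>
      intro a h
      have hle : szamok.length ≤ a := List.drop_eq_nil_iff.mp h
      rw [PySem.List.pyRange_one_eq_nil (by exact_mod_cast hle)]
      simp [bIdx]
  | cons s rest ih =>
      intro a h
      have hlt : a < szamok.length := drop_cons_lt h
      have hget : szamok[a]? = some s := drop_cons_getElem? h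
      rw [PySem.List.pyRange_one_cons (by exact_mod_cast hlt)]
      have hgetD : PySem.List.pyGetD szamok (a : Int) (0, 0) = s := by
        rw [PySem.List.pyGetD_natCast, List.getD_eq_getElem?_getD, hget]
        rfl
      simp only [List.find?_cons, hgetD, bIdx]
      by_cases hv : s.2 = v
      · simp [hv]
      · have hb : (s.2 == v) = false := beq_eq_false_iff_ne.mpr hv
        rw [hb, if_neg hv]
        have hcast : (a : Int) + 1 = ((a + 1 : Nat) : Int) := by push_cast; ring
        rw [hcast]
        exact ih (a + 1) (drop_cons_tail h)

lemma filt_fold (xs : List (Int × Int)) :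
    ∀ m : Int, 0 ≤ m →
    ((xs.filter (fun s => decide (s.2 > 0))).map (fun s => s.2)).foldl max m
      = xs.foldl (fun a s => max a s.2) m := by
  induction xs with
  | nil => intro m _; rfl
  | cons s rest ih =>
      intro m hm
      by_cases hs : s.2 > 0
      · simp only [List.filter_cons, hs, decide_true, List.foldl_cons]
        exact ih (max m s.2) (le_trans hm (le_max_left _ _))
      · simp only [List.filter_cons, hs, decide_false, List.foldl_cons]
        rw [max_eq_left (by omega)]
        exact ih m hm

lemma maxD_eq (xs : List (Int × Int)) :
    PySem.List.maxD ((xs.filter (fun s => decide (s.2 > 0))).map (fun s => s.2)) (fun v => v) 0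
      = xs.foldl (fun a s => max a s.2) 0 := by
  cases hl : (xs.filter (fun s => decide (s.2 > 0))).map (fun s => s.2) with
  | nil =>
      have := filt_fold xs 0 le_rfl
      rw [hl] at this
      simp only [List.foldl_nil] at this
      rw [← this]
      simp [PySem.List.maxD, PySem.List.max?]
  | cons x t =>
      have hx : 0 < x := by
        have hmem : x ∈ (xs.filter (fun s => decide (s.2 > 0))).map (fun s => s.2) := by
          rw [hl]; exact List.mem_cons_self
        simp only [List.mem_map, List.mem_filter, decide_eq_true_eq] at hmem
        obtain ⟨s, ⟨_, hs⟩, rfl⟩ := hmem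
        exact hs
      have := filt_fold xs 0 le_rfl
      rw [hl] at this
      simp only [List.foldl_cons] at this
      rw [max_eq_right (by omega)] at this
      rw [← this]
      simp [PySem.List.maxD, PySem.List.max?_id_cons]

lemma aRun_spec (nevek : List String) :
    ∀ (ys : List (Int × Int)) (k : Nat) (m : Int) (nm : Option String),
    aRun nevek ys k (m, nm) =
      (ys.foldl (fun a s => max a s.2) m,
       if ys.foldl (fun a s => max a s.2) m = m then nm
       else (bIdx (ys.foldl (fun a s => max a s.2) m) ys k).elim none
              (fun j => PySem.List.pyGet? nevek (j : Int))) := by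
  intro ys
  induction ys with
  | nil => intro k m nm; simp [aRun]
  | cons s rest ih =>
      intro k m nm
      have hub := (PySem.List.le_foldl_max_int rest (fun s => s.2) (max m s.2)).1
      simp only [aRun, List.foldl_cons]
      by_cases hs : s.2 > m
      · rw [if_pos hs, max_eq_right (le_of_lt hs)]
        rw [max_eq_right (le_of_lt hs)] at hub
        rw [ih]
        have hMm : rest.foldl (fun a s => max a s.2) s.2 ≠ m := by omega
        rw [if_neg hMm]
        by_cases h2 : s.2 = rest.foldl (fun a s => max a s.2) s.2
        · simp only [bIdx, if_pos h2, if_pos h2.symm, Option.elim]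
        · have h2' : rest.foldl (fun a s => max a s.2) s.2 ≠ s.2 := fun h => h2 h.symm
          simp only [bIdx, if_neg h2, if_neg h2']
      · rw [if_neg hs, max_eq_left (by omega), ih]
        rw [max_eq_left (by omega)] at hub
        by_cases hM : rest.foldl (fun a s => max a s.2) m = m
        · rw [if_pos hM, if_pos hM]
        · rw [if_neg hM, if_neg hM]
          have hsne : s.2 ≠ rest.foldl (fun a s => max a s.2) m := by omega
          simp only [bIdx, if_neg hsne]

lemma maxkedd_eq_closed (szamok : List (Int × Int)) (nevek : List String) :
    maxkedd szamok nevek =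
      (szamok.foldl (fun a s => max a s.2) 0,
       if szamok.foldl (fun a s => max a s.2) 0 = 0 then none
       else (bIdx (szamok.foldl (fun a s => max a s.2) 0) szamok 0).elim none
              (fun j => PySem.List.pyGet? nevek (j : Int))) := by
  unfold maxkedd
  have h := A_seg szamok nevek szamok 0 (0, none) (by simp)
  simp only [Nat.cast_zero] at h
  rw [h]
  exact aRun_spec nevek szamok 0 0 none

-- ===== VERDICT (by name: the statement is the Claim_ definition above) =====
theorem maxkedd_spec : Claim_equal_maxkedd := by
  intro szamok nevek _ _
  unfold Spec_maxkedd maxkedd_alt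
  rw [maxkedd_eq_closed, maxD_eq]
  set M := szamok.foldl (fun a s => max a s.2) 0 with hM
  by_cases h0 : M = 0
  · simp [h0]
  · rw [if_neg h0]
    have hB := B_seg szamok M szamok 0 (by simp)
    simp only [Nat.cast_zero] at hB
    simp only [hB, if_neg h0]
    cases hb : bIdx M szamok 0 with
    | none => simp [Option.elim]
    | some j => simp [Option.elim]
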